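-- pv_equiv track=rewrite | github.com/selcukaydintr/Oled-Eye_Mouth | src/modules/led_controller_animations.py | _precompute_rainbow_cycles
-- ===== SOURCE A (Python) =====
-- from typing import Dict, List, Tuple, Optional, Union, Callable
--
-- def _precompute_rainbow_cycles(count: int) -> List:
--     """Gökkuşağı döngülerini önceden hesaplar"""
--     cycles = []
--     for i in range(256):
--         colors = []
--         for j in range(count):
--             pos = ((i + j) & 255)
--             # Optimize edilmiş HSV→RGB dönüşümü
--             if pos < 85:
--                 colors.append((pos * 3, 255 - pos * 3, 0))
--             elif pos < 170:
--                 pos -= 85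
--                 colors.append((255 - pos * 3, 0, pos * 3))
--             else:
--                 pos -= 170
--                 colors.append((0, pos * 3, 255 - pos * 3))
--         cycles.append(colors)
--     return cycles
-- ===== SOURCE B (Python) =====
-- from typing import Dict, List, Tuple, Optional, Union, Callable
--
-- def _color(pos):
--     if pos < 85:
--         return (pos * 3, 255 - pos * 3, 0)
--     if pos < 170:
--         pos -= 85
--         return (255 - pos * 3, 0, pos * 3)
--     pos -= 170
--     return (0, pos * 3, 255 - pos * 3)
--
-- def _precompute_rainbow_cycles(count: int) -> List:
--     """Gökkuşağı döngülerini önceden hesaplar"""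
--     # Cycle 0 is computed directly; each later cycle i is a rotation of the
--     # previous one: drop its first color and append the one new color that
--     # enters the window.  (row + [c])[1:] also keeps the empty row (count<=0)
--     # empty, so only ONE new color is computed per cycle.
--     row = [_color(j & 255) for j in range(count)]
--     cycles = [row]
--     for i in range(1, 256):
--         row = (row + [_color((i + count - 1) & 255)])[1:]
--         cycles.append(row)
--     return cycles
-- ===== Notes on version B (the rewrite author's own statement) =====
-- stated objective: faster
-- what changed: B computes only cycle 0 with the color arithmetic and then derives each of the other 255 cycles from its predecessor by a rotation (drop the first color, append one newly computed color), so the HSV branch arithmetic runs count+255 times instead of 256*count times.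
import Mathlib
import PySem

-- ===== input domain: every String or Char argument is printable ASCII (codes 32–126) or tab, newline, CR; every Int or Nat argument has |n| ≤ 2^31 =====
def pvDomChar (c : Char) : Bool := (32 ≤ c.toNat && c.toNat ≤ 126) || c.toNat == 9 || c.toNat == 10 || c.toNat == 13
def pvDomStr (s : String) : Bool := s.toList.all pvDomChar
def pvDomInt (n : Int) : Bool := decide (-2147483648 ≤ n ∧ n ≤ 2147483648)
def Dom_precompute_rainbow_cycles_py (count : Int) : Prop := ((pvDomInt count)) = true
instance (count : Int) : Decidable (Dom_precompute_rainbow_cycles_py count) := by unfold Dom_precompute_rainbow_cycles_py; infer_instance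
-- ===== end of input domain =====

-- B computes cycle 0 once and derives each later cycle from its predecessor by
-- rotation (drop first color, append one new color); return value proved equal to A's.

-- ===== PORT A =====
def precompute_rainbow_cycles_py (count : Int) : List (List (Int × Int × Int)) :=
  (PySem.List.pyRange 0 256 1).foldl (fun cycles i =>
    cycles ++ [(PySem.List.pyRange 0 count 1).foldl (fun colors j =>
      let pos := PySem.Int.band (i + j) 255
      if pos < 85 then
        colors ++ [(pos * 3, 255 - pos * 3, 0)]
      else if pos < 170 then
        let pos := pos - 85
        colors ++ [(255 - pos * 3, 0, pos * 3)]
      else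
        let pos := pos - 170
        colors ++ [(0, pos * 3, 255 - pos * 3)]) []]) []

-- ===== PORT B =====
-- helper _color from Source B
def pvColorB (pos : Int) : Int × Int × Int :=
  if pos < 85 then (pos * 3, 255 - pos * 3, 0)
  else if pos < 170 then
    let pos := pos - 85
    (255 - pos * 3, 0, pos * 3)
  else
    let pos := pos - 170
    (0, pos * 3, 255 - pos * 3)

-- (row + [c])[1:] is ported as (row ++ [c]).drop 1 — exact, the slice start 1 is nonnegative
def precompute_rainbow_cycles_py_alt (count : Int) : List (List (Int × Int × Int)) :=
  let row := (PySem.List.pyRange 0 count 1).map (fun j => pvColorB (PySem.Int.band j 255))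
  let st := (PySem.List.pyRange 1 256 1).foldl
    (fun (st : List (List (Int × Int × Int)) × List (Int × Int × Int)) i =>
      let row := (st.2 ++ [pvColorB (PySem.Int.band (i + count - 1) 255)]).drop 1
      (st.1 ++ [row], row)) ([row], row)
  st.1

-- ===== PRECONDITION & SPEC =====
def Spec_precompute_rainbow_cycles_py (count : Int) (out : List (List (Int × Int × Int))) : Prop := out = precompute_rainbow_cycles_py_alt count
instance (count : Int) (out : List (List (Int × Int × Int))) : Decidable (Spec_precompute_rainbow_cycles_py count out) := by unfold Spec_precompute_rainbow_cycles_py; infer_instance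

-- ===== CLAIM (what is proved, stated in full; the proofs are below) =====
def Claim_equal_precompute_rainbow_cycles_py : Prop := ∀ (count : Int), Dom_precompute_rainbow_cycles_py count → Spec_precompute_rainbow_cycles_py count (precompute_rainbow_cycles_py count)

-- ===== LEMMAS AND PROOFS =====

-- row i of A's table, as a map
def pvRRow (count i : Int) : List (Int × Int × Int) :=
  (PySem.List.pyRange 0 count 1).map (fun j => pvColorB (PySem.Int.band (i + j) 255))

-- building by repeated append is map
theorem pv_foldl_append_eq_map {α β : Type} (f : α → β) (l : List α) (init : List β) :
    l.foldl (fun acc x => acc ++ [f x]) init = init ++ l.map f := by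
  induction l generalizing init with
  | nil => simp
  | cons x xs ih => simp [List.foldl, ih]

-- A's inner loop literally computes pvColorB at each position
theorem pv_A_row (count i : Int) :
    (PySem.List.pyRange 0 count 1).foldl (fun colors j =>
      let pos := PySem.Int.band (i + j) 255
      if pos < 85 then
        colors ++ [(pos * 3, 255 - pos * 3, 0)]
      else if pos < 170 then
        let pos := pos - 85
        colors ++ [(255 - pos * 3, 0, pos * 3)]
      else
        let pos := pos - 170
        colors ++ [(0, pos * 3, 255 - pos * 3)]) [] = pvRRow count i := by
  have h : (PySem.List.pyRange 0 count 1).foldl (fun colors j =>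
      colors ++ [pvColorB (PySem.Int.band (i + j) 255)]) []
      = pvRRow count i := by
    simpa [pvRRow] using pv_foldl_append_eq_map
      (fun j => pvColorB (PySem.Int.band (i + j) 255)) (PySem.List.pyRange 0 count 1) []
  rw [← h]
  apply PySem.List.foldl_congr_mem
  intro colors j _
  simp only [pvColorB]
  split_ifs <;> rfl

-- generic rotation step on Nat ranges
theorem pv_rot_nat {α : Type} (F : Int → α) (m : Nat) (i : Int) :
    ((List.range m).map (fun k : Nat => F (i - 1 + (k : Int))) ++ [F (i - 1 + (m : Int))]).drop 1
      = (List.range m).map (fun k : Nat => F (i + (k : Int))) := by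
  have h : (List.range m).map (fun k : Nat => F (i - 1 + (k : Int))) ++ [F (i - 1 + (m : Int))]
      = (List.range (m + 1)).map (fun k : Nat => F (i - 1 + (k : Int))) := by
    rw [List.range_succ, List.map_append]; simp
  rw [h, List.range_succ_eq_map]
  simp only [List.map_cons, List.drop_succ_cons, List.drop_zero, List.map_map]
  apply List.map_congr_left
  intro k _
  simp only [Function.comp]
  congr 1
  push_cast
  ring

-- one rotation step turns row (i-1) into row i
theorem pv_rot_step (count i : Int) :
    (pvRRow count (i - 1) ++ [pvColorB (PySem.Int.band (i + count - 1) 255)]).drop 1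
      = pvRRow count i := by
  by_cases hc : count ≤ 0
  · simp [pvRRow, PySem.List.pyRange_one_eq_nil hc]
  · have hlast : pvColorB (PySem.Int.band (i + count - 1) 255)
        = (fun x => pvColorB (PySem.Int.band x 255)) (i - 1 + ((count.toNat : Int))) := by
      simp only []
      congr 2
      omega
    unfold pvRRow
    rw [PySem.List.pyRange_one]
    simp only [sub_zero, zero_add, List.map_map]
    rw [hlast]
    exact pv_rot_nat (fun x => pvColorB (PySem.Int.band x 255)) count.toNat i

-- fold invariant: the rotation loop produces consecutive rows
theorem pv_fold_inv (count : Int) (m : Nat) (a : Int) (acc : List (List (Int × Int × Int))) :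
    ((List.range m).map (fun k : Nat => a + (k : Int))).foldl
      (fun (st : List (List (Int × Int × Int)) × List (Int × Int × Int)) i =>
        let row := (st.2 ++ [pvColorB (PySem.Int.band (i + count - 1) 255)]).drop 1
        (st.1 ++ [row], row)) (acc, pvRRow count (a - 1))
    = (acc ++ (List.range m).map (fun k : Nat => pvRRow count (a + (k : Int))), pvRRow count (a - 1 + m)) := by
  induction m with
  | zero => simp
  | succ n ih =>
    rw [List.range_succ, List.map_append, List.foldl_append, ih]
    simp only [List.map_cons, List.foldl_cons, List.foldl_nil, List.map_append, List.map_nil]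
    have h1 : a - 1 + (n : Int) = (a + (n : Int)) - 1 := by ring
    have h2 : (pvRRow count ((a + (n : Int)) - 1)
        ++ [pvColorB (PySem.Int.band ((a + (n : Int)) + count - 1) 255)]).drop 1
        = pvRRow count (a + (n : Int)) := pv_rot_step count (a + (n : Int))
    rw [h1, h2]
    simp only [Prod.mk.injEq]
    constructor
    · simp [List.append_assoc]
    · congr 1; push_cast; ring

-- ===== VERDICT (by name: the statement is the Claim_ definition above) =====
set_option maxRecDepth 4000 in
theorem precompute_rainbow_cycles_py_spec : Claim_equal_precompute_rainbow_cycles_py := by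
  intro count _
  unfold Spec_precompute_rainbow_cycles_py precompute_rainbow_cycles_py precompute_rainbow_cycles_py_alt
  -- A side: table of rows
  rw [pv_foldl_append_eq_map (fun i =>
    (PySem.List.pyRange 0 count 1).foldl (fun colors j =>
      let pos := PySem.Int.band (i + j) 255
      if pos < 85 then
        colors ++ [(pos * 3, 255 - pos * 3, 0)]
      else if pos < 170 then
        let pos := pos - 85
        colors ++ [(255 - pos * 3, 0, pos * 3)]
      else
        let pos := pos - 170
        colors ++ [(0, pos * 3, 255 - pos * 3)]) []) (PySem.List.pyRange 0 256 1) []]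
  rw [show (fun i =>
    (PySem.List.pyRange 0 count 1).foldl (fun colors j =>
      let pos := PySem.Int.band (i + j) 255
      if pos < 85 then
        colors ++ [(pos * 3, 255 - pos * 3, 0)]
      else if pos < 170 then
        let pos := pos - 85
        colors ++ [(255 - pos * 3, 0, pos * 3)]
      else
        let pos := pos - 170
        colors ++ [(0, pos * 3, 255 - pos * 3)]) []) = (fun i => pvRRow count i)
    from funext (fun i => pv_A_row count i)]
  simp only [List.nil_append]
  -- B side: initial row is pvRRow count 0
  have hrow0 : (PySem.List.pyRange 0 count 1).map (fun j => pvColorB (PySem.Int.band j 255))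
      = pvRRow count 0 := by
    unfold pvRRow
    apply List.map_congr_left
    intro j _
    simp
  have hr : PySem.List.pyRange 1 256 1 = (List.range 255).map (fun k : Nat => 1 + (k : Int)) := by
    rw [PySem.List.pyRange_one]; rfl
  simp only [hrow0, hr]
  rw [show ([pvRRow count 0], pvRRow count 0)
      = (([pvRRow count 0] : List (List (Int × Int × Int))), pvRRow count ((1:Int) - 1)) by norm_num]
  rw [pv_fold_inv count 255 1 [pvRRow count 0]]
  -- both sides are the 256 rows
  have hrng : PySem.List.pyRange 0 256 1 = (List.range 256).map (fun k : Nat => (k : Int)) := by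
    rw [PySem.List.pyRange_one]; rfl
  rw [hrng, List.map_map, List.range_succ_eq_map]
  simp only [List.map_cons, List.map_map, List.singleton_append, Function.comp]
  have htail : List.map (((fun i => pvRRow count i) ∘ fun k : Nat => (k : Int)) ∘ Nat.succ) (List.range 255)
      = List.map (fun k : Nat => pvRRow count (1 + (k : Int))) (List.range 255) := by
    apply List.map_congr_left
    intro k _
    simp only [Function.comp_apply]
    congr 1
    push_cast
    ring
  rw [htail]
  norm_num
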